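-- pv_equiv track=rewrite | github.com/sarthak-sahoo-0710/luminal_basal_EMT_crosstalk | receptor_ligand_analysis/relevant_receptor_ligand.py | common_genes_across_all_patients
-- ===== SOURCE A (Python) =====
-- def common_genes_across_all_patients(data):
--     first_list = list(data.values())[0]
--
--     common_elements = []
--     for element in first_list:
--         is_common = all(element in sublist for sublist in data.values())
--         if is_common:
--             common_elements.append(element)
--
--     return common_elements
-- ===== SOURCE B (Python) =====
-- def common_genes_across_all_patients(data):
--     values = list(data.values())
--     common = set(values[0])
--     for sub in values[1:]:
--         common &= set(sub)
--     return [gene for gene in values[0] if gene in common]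
-- ===== Notes on version B (the rewrite author's own statement) =====
-- stated objective: alternative
-- what changed: Builds the intersection of all value-lists once as a set (running set-intersection over the remaining lists), then does a single membership-filtering pass over the first list, instead of rescanning every sublist for every element of the first list.
import Mathlib
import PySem

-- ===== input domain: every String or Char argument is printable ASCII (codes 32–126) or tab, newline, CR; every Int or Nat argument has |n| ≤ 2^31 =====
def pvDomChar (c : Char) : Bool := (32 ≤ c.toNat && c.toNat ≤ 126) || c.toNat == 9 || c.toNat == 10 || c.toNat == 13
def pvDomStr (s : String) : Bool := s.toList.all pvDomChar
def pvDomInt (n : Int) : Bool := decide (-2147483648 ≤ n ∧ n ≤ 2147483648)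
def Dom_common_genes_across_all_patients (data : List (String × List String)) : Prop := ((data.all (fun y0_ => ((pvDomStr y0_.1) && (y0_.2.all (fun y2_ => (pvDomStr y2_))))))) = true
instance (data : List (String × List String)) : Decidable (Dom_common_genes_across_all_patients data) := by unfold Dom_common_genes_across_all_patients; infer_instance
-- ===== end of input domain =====

-- B computes the intersection of all value-lists once as a set, then filters the first list in one pass (a different algorithm; measured cost comparable to A).


-- ===== PORT A =====
def common_genes_across_all_patients (data : List (String × List String)) : List String :=
  let vals := (PySem.Dict.ofList data).values
  let first_list := (PySem.List.pyGet? vals 0).getD []   -- list(data.values())[0]; none (IndexError) excluded by Pre_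
  first_list.foldl
    (fun common_elements element =>
      if vals.all (fun sublist => sublist.contains element)
      then common_elements ++ [element] else common_elements) []

-- ===== PORT B =====
def common_genes_across_all_patients_alt (data : List (String × List String)) : List String :=
  let values := (PySem.Dict.ofList data).values
  let first := (PySem.List.pyGet? values 0).getD []   -- values[0]; IndexError on empty dict, excluded by Pre_
  let common := (values.drop 1).foldl (fun s sub => s.filter (fun g => sub.contains g)) (PySem.Set.ofList first)
  first.filter (fun g => common.contains g)

-- ===== PRECONDITION & SPEC =====
-- Pre_ excludes the empty dict, on which A raises IndexError at list(data.values())[0].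
def Pre_common_genes_across_all_patients (data : List (String × List String)) : Prop := data ≠ []
instance (data : List (String × List String)) : Decidable (Pre_common_genes_across_all_patients data) := by unfold Pre_common_genes_across_all_patients; infer_instance
def pvWitness_common_genes_across_all_patients : (List (String × List String)) := [("p1", ["a", "b"]), ("p2", ["b"])]
def Spec_common_genes_across_all_patients (data : List (String × List String)) (out : List String) : Prop := out = common_genes_across_all_patients_alt data
instance (data : List (String × List String)) (out : List String) : Decidable (Spec_common_genes_across_all_patients data out) := by unfold Spec_common_genes_across_all_patients; infer_instance

-- ===== CLAIM (what is proved, stated in full; the proofs are below) =====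
def Claim_equal_common_genes_across_all_patients : Prop := ∀ (data : List (String × List String)), Dom_common_genes_across_all_patients data → Pre_common_genes_across_all_patients data → Spec_common_genes_across_all_patients data (common_genes_across_all_patients data)

-- ===== LEMMAS AND PROOFS =====

-- membership in a filtered list, as Bool.contains
theorem contains_filter (l : List String) (e : String) (p : String → Bool) :
    (l.filter p).contains e = (l.contains e && p e) := by
  by_cases he : e ∈ l <;> by_cases hp : p e = true <;> simp [List.mem_filter, he, hp]

-- membership in the running intersection fold
theorem contains_foldl_filter (l : List (List String)) (s : List String) (e : String) :
    (l.foldl (fun s sub => s.filter (fun g => sub.contains g)) s).contains e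
      = (s.contains e && l.all (fun sub => sub.contains e)) := by
  induction l generalizing s with
  | nil => simp
  | cons h t ih =>
    simp only [List.foldl_cons, ih, List.all_cons, contains_filter, Bool.and_assoc]

theorem values_ofList_ne_nil (data : List (String × List String)) (h : data ≠ []) :
    (PySem.Dict.ofList data).values ≠ [] := by
  intro hv
  have hkeys : (PySem.Dict.ofList data).keys =
      PySem.Set.update (PySem.Dict.empty (κ := String) (ν := List String)).keys (data.map (·.1)) := by
    show (data.foldl (fun d p => d.insert p.1 p.2) PySem.Dict.empty).keys = _
    exact PySem.Dict.keys_foldl_insert_key data (·.1) (fun d p => p.2) PySem.Dict.empty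
  cases data with
  | nil => exact h rfl
  | cons p t =>
    have hmem : p.1 ∈ (PySem.Dict.ofList (p :: t)).keys := by
      rw [hkeys]
      simp [PySem.Set.mem_update]
    have hitems : (PySem.Dict.ofList (p :: t)).items = [] := by
      simp only [PySem.Dict.values] at hv
      exact List.map_eq_nil_iff.mp hv
    simp only [PySem.Dict.keys, hitems, List.map_nil] at hmem
    exact (List.not_mem_nil) hmem

-- ===== VERDICT (by name: the statement is the Claim_ definition above) =====
theorem common_genes_across_all_patients_spec : Claim_equal_common_genes_across_all_patients := by
  intro data _ hpre
  unfold Spec_common_genes_across_all_patients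
  unfold common_genes_across_all_patients common_genes_across_all_patients_alt
  obtain ⟨v0, rest, hv⟩ := List.exists_cons_of_ne_nil (values_ofList_ne_nil data hpre)
  simp only [hv]
  have h0 : (PySem.List.pyGet? (v0 :: rest) 0).getD [] = v0 := by
    simp [PySem.List.pyGet?, PySem.List.pyIdx?]
  rw [h0, PySem.List.foldl_append_if_eq_filter]
  simp only [List.nil_append, List.drop_one, List.tail_cons]
  apply List.filter_congr
  intro e he
  have hc := contains_foldl_filter rest (PySem.Set.ofList v0) e
  refine Eq.trans ?_ hc.symm
  simp [List.all_cons, he, PySem.Set.mem_ofList]
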